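-- pv_equiv track=rewrite | github.com/nikmolnar/aoc2019 | solutions/day_4.py | meets_criteria
-- ===== SOURCE A (Python) =====
-- def meets_criteria(password):
--     password_s = str(password)
--
--     if len(password_s) > 6:
--         return False
--
--     has_double = False
--     for i in range(len(password_s) - 1):
--         if password_s[i] > password_s[i+1]:  # yes, this works on digits-as-strings
--             return False
--         if password_s[i] == password_s[i+1]:
--             has_double = True
--
--     return has_double
-- ===== SOURCE B (Python) =====
-- def meets_criteria(password):
--     s = str(password)
--     return len(s) <= 6 and s == ''.join(sorted(s)) and len(set(s)) < len(s)
-- ===== Notes on version B (the rewrite author's own statement) =====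
-- stated objective: idiomatic
-- what changed: Replaces the fused index loop with early returns by three independent whole-string checks: length guard, equality with the sorted string (non-decreasing), and a set-size comparison (duplicate digit, necessarily adjacent in a non-decreasing string).
import Mathlib
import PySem

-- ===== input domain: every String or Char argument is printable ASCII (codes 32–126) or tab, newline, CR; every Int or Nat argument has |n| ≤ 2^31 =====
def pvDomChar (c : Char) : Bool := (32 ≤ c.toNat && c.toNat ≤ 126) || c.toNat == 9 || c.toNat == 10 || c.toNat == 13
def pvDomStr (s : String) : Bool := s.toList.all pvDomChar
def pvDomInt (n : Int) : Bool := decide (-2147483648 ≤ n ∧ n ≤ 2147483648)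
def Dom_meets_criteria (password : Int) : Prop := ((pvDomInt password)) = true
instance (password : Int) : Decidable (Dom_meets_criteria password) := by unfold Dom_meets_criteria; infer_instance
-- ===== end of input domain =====

-- B replaces A's fused adjacent-pair loop by three independent whole-string checks
-- (length guard, string equals its sort, set of digits smaller than the string): idiomatic, not faster.


-- ===== PORT A =====
-- A's loop: for i in range(len(s) - 1): early return False on a decreasing pair,
-- set has_double on an equal pair.  (The `| _, _ => false` arm is unreachable:
-- every index produced by range(len(s)-1) is in range for s[i] and s[i+1].)
def mcLoop (l : List Char) (idxs : List Int) (has_double : Bool) : Bool :=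
  match idxs with
  | [] => has_double
  | i :: rest =>
    match PySem.List.pyGet? l i, PySem.List.pyGet? l (i + 1) with
    | some a, some b =>
      if a > b then false
      else mcLoop l rest (if a == b then true else has_double)
    | _, _ => false

def meets_criteria (password : Int) : Bool :=
  let password_s := PySem.Int.toChars password
  if PySem.List.len password_s > 6 then false
  else mcLoop password_s (PySem.List.pyRange 0 (PySem.List.len password_s - 1) 1) false

-- ===== PORT B =====
-- Source B: s = str(password); return len(s) <= 6 and s == ''.join(sorted(s)) and len(set(s)) < len(s)
def meets_criteria_alt (password : Int) : Bool :=
  let s := PySem.Int.toChars password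
  decide (PySem.List.len s ≤ 6)
    && (s == PySem.List.sorted s (fun c => c) false)
    && decide ((PySem.Set.ofList s).length < s.length)

-- ===== PRECONDITION & SPEC =====
def Spec_meets_criteria (password : Int) (out : Bool) : Prop := out = meets_criteria_alt password
instance (password : Int) (out : Bool) : Decidable (Spec_meets_criteria password out) := by unfold Spec_meets_criteria; infer_instance

-- ===== CLAIM (what is proved, stated in full; the proofs are below) =====
def Claim_equal_meets_criteria : Prop := ∀ (password : Int), Dom_meets_criteria password → Spec_meets_criteria password (meets_criteria password)

-- ===== LEMMAS AND PROOFS =====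

-- structural form of A's loop: scan adjacent pairs
def pairScan : List Char → Bool → Bool
  | a :: b :: rest, hd => if a > b then false else pairScan (b :: rest) (if a == b then true else hd)
  | _, hd => hd

-- structural "has an adjacent equal pair"
def adjB : List Char → Bool
  | a :: b :: rest => (a == b) || adjB (b :: rest)
  | _ => false

theorem pairScan_short (l : List Char) (hd : Bool) (h : l.length ≤ 1) : pairScan l hd = hd := by
  match l with
  | [] => rfl
  | [_] => rfl
  | _ :: _ :: _ => simp at h

theorem mcLoop_eq_pairScan (l : List Char) :
    ∀ (k : Nat) (hd : Bool),
      mcLoop l (PySem.List.pyRange (k : Int) ((l.length : Int) - 1) 1) hd = pairScan (l.drop k) hd := by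
  have H : ∀ (n k : Nat), l.length - k ≤ n → ∀ hd : Bool,
      mcLoop l (PySem.List.pyRange (k : Int) ((l.length : Int) - 1) 1) hd = pairScan (l.drop k) hd := by
    intro n
    induction n with
    | zero =>
      intro k hk hd
      rw [PySem.List.pyRange_one_eq_nil (by omega)]
      rw [pairScan_short _ _ (by simp; omega)]
      rfl
    | succ n ih =>
      intro k hk hd
      by_cases hlt : (k : Int) < (l.length : Int) - 1
      · have hk1 : k + 1 < l.length := by omega
        have hk0 : k < l.length := by omega
        rw [PySem.List.pyRange_one_cons hlt]
        have g1 : PySem.List.pyGet? l (k : Int) = some l[k] := by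
          simp [pysem, List.getElem?_eq_getElem hk0]
        have g2 : PySem.List.pyGet? l ((k : Int) + 1) = some l[k + 1] := by
          have hcast : (k : Int) + 1 = ((k + 1 : Nat) : Int) := by push_cast; ring
          rw [hcast, PySem.List.pyGet?_natCast, List.getElem?_eq_getElem hk1]
        have hd1 : l.drop k = l[k] :: l.drop (k + 1) := List.drop_eq_getElem_cons hk0
        have hd2 : l.drop (k + 1) = l[k + 1] :: l.drop (k + 2) := List.drop_eq_getElem_cons hk1
        rw [hd1, hd2]
        show mcLoop l ((k : Int) :: _) hd = pairScan _ hd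
        rw [mcLoop, g1, g2]
        simp only [pairScan]
        by_cases hab : l[k] > l[k + 1]
        · simp [hab]
        · simp only [hab, if_false]
          have : (k : Int) + 1 = ((k + 1 : Nat) : Int) := by push_cast; ring
          rw [this, ih (k + 1) (by omega), ← hd2]
      · rw [PySem.List.pyRange_one_eq_nil (by omega)]
        rw [pairScan_short _ _ (by simp; omega)]
        rfl
  intro k hd
  exact H (l.length - k) k (le_refl _) hd

-- Bool form of "non-decreasing" used only by the proofs
def nondec : List Char → Bool
  | a :: b :: rest => (a ≤ b) && nondec (b :: rest)
  | _ => true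

theorem pairScan_spec : ∀ (l : List Char) (hd : Bool),
    pairScan l hd = (nondec l && (hd || adjB l)) := by
  intro l
  induction l with
  | nil => intro hd; simp [pairScan, adjB, nondec]
  | cons a t ih =>
    intro hd
    match t with
    | [] => simp [pairScan, adjB, nondec]
    | b :: rest =>
      by_cases hab : a > b
      · have h1 : ¬ (a ≤ b) := not_le.mpr hab
        simp [pairScan, nondec, hab, h1]
      · have hle : a ≤ b := not_lt.mp hab
        simp only [pairScan, hab, if_false, nondec, adjB, hle, decide_true, Bool.true_and]
        by_cases he : a = b
        · simp [he, ih]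
        · have hne : (a == b) = false := by simp [he]
          simp only [hne, Bool.false_or, ih]
          simp

theorem nondec_iff_pairwise : ∀ l : List Char, nondec l = true ↔ l.Pairwise (· ≤ ·) := by
  intro l
  induction l with
  | nil => simp [nondec]
  | cons a t ih =>
    match t with
    | [] => simp [nondec]
    | b :: rest =>
      simp only [nondec, Bool.and_eq_true, decide_eq_true_iff, ih]
      constructor
      · rintro ⟨hab, hpw⟩
        refine List.pairwise_cons.mpr ⟨?_, hpw⟩
        intro x hx
        rcases List.mem_cons.mp hx with h | h
        · exact h ▸ hab
        · exact le_trans hab ((List.pairwise_cons.mp hpw).1 x h)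
      · intro hpw
        obtain ⟨hall, hpw'⟩ := List.pairwise_cons.mp hpw
        exact ⟨hall b (List.mem_cons_self ..), hpw'⟩

theorem adjB_iff_not_nodup : ∀ l : List Char, l.Pairwise (· ≤ ·) →
    (adjB l = true ↔ ¬ l.Nodup) := by
  intro l
  induction l with
  | nil => intro _; simp [adjB]
  | cons a t ih =>
    intro hpw
    match t with
    | [] => simp [adjB]
    | b :: rest =>
      obtain ⟨hall, hpw'⟩ := List.pairwise_cons.mp hpw
      by_cases he : a = b
      · subst he
        simp [adjB]
      · have hnotmem : a ∉ b :: rest := by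
          have hlt : a < b := lt_of_le_of_ne (hall b (List.mem_cons_self ..)) he
          intro hmem
          rcases List.mem_cons.mp hmem with h | h
          · exact he h
          · have hba : b ≤ a := (List.pairwise_cons.mp hpw').1 a h
            exact absurd (lt_of_lt_of_le hlt hba) (lt_irrefl a)
        have hne : (a == b) = false := by simp [he]
        simp only [adjB, hne, Bool.false_or, ih hpw', List.nodup_cons]
        tauto

-- len(set(s)) < len(s)  ↔  s has a repeated character
theorem ofList_length_lt_iff_not_nodup (l : List Char) :
    (PySem.Set.ofList l).length < l.length ↔ ¬ l.Nodup := by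
  have hperm : (PySem.Set.ofList l).Perm l.dedup := by
    refine (List.perm_ext_iff_of_nodup (PySem.Set.nodup_ofList l) l.nodup_dedup).mpr ?_
    intro x
    rw [PySem.Set.mem_ofList, List.mem_dedup]
  rw [hperm.length_eq]
  constructor
  · intro hlt hnd
    rw [List.Nodup.dedup hnd] at hlt
    omega
  · intro hnd
    have hle : l.dedup.length ≤ l.length := l.dedup_sublist.length_le
    rcases lt_or_eq_of_le hle with h | h
    · exact h
    · exact absurd (List.nodup_dedup l) (by rw [l.dedup_sublist.eq_of_length h]; exact hnd)

-- s == ''.join(sorted(s))  ↔  s is non-decreasing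
theorem beq_sorted_eq_nondec (l : List Char) :
    (l == PySem.List.sorted l (fun c => c) false) = nondec l := by
  rcases Bool.eq_false_or_eq_true (l == PySem.List.sorted l (fun c => c) false) with h | h
  · rw [h]
    symm
    rw [beq_iff_eq] at h
    exact (nondec_iff_pairwise l).mpr (by
      have hpw := PySem.List.sorted_pairwise l (fun c => c) (κ := Char)
      rw [← h] at hpw
      exact hpw)
  · rw [h]
    symm
    rw [Bool.eq_false_iff]
    intro hnd
    have hself : PySem.List.sorted l (fun c => c) false = l :=
      PySem.List.sorted_eq_self_of_pairwise l _ ((nondec_iff_pairwise l).mp hnd)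
    rw [beq_eq_false_iff_ne] at h
    exact h hself.symm

-- ===== VERDICT (by name: the statement is the Claim_ definition above) =====
theorem meets_criteria_spec : Claim_equal_meets_criteria := by
  intro password _
  unfold Spec_meets_criteria meets_criteria meets_criteria_alt
  set l := PySem.Int.toChars password with hl
  simp only [PySem.List.len_eq]
  by_cases hlen : (l.length : Int) > 6
  · have h6 : ¬ ((l.length : Int) ≤ 6) := by omega
    simp [hlen, h6]
  · have h6 : (l.length : Int) ≤ 6 := by omega
    simp only [hlen, if_false, h6, decide_true, Bool.true_and]
    have h0 : (0 : Int) = ((0 : Nat) : Int) := rfl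
    rw [h0, mcLoop_eq_pairScan l 0 false, List.drop_zero, pairScan_spec, Bool.false_or]
    rw [beq_sorted_eq_nondec]
    rcases Bool.eq_false_or_eq_true (nondec l) with hnd | hnd
    · have hpw := (nondec_iff_pairwise l).mp hnd
      simp only [hnd, Bool.true_and]
      rcases Bool.eq_false_or_eq_true (adjB l) with ha | ha
      · rw [ha]
        symm
        rw [decide_eq_true_eq]
        exact (ofList_length_lt_iff_not_nodup l).mpr ((adjB_iff_not_nodup l hpw).mp ha)
      · rw [ha]
        symm
        rw [decide_eq_false_iff_not]
        intro hlt
        exact absurd ((adjB_iff_not_nodup l hpw).mpr ((ofList_length_lt_iff_not_nodup l).mp hlt)) (by simp [ha])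
    · simp [hnd]
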